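-- pv_equiv track=rewrite | github.com/alswl0120/Diagnostic-App | assessment/session.py | get_domain_and_local_index
-- ===== SOURCE A (Python) =====
-- def get_domain_and_local_index(ordered_items: list, flat_index: int) -> tuple:
--     domain_counters = {}
--     for i, item in enumerate(ordered_items):
--         domain = item["domain"]
--         if domain not in domain_counters:
--             domain_counters[domain] = 0
--         if i == flat_index:
--             return domain, domain_counters[domain]
--         domain_counters[domain] += 1
--     return None, None
-- ===== SOURCE B (Python) =====
-- def get_domain_and_local_index(ordered_items: list, flat_index: int) -> tuple:
--     if flat_index < 0 or flat_index >= len(ordered_items):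
--         return None, None
--     domain = ordered_items[flat_index]["domain"]
--     local = sum(1 for item in ordered_items[:flat_index] if item["domain"] == domain)
--     return domain, local
-- ===== Notes on version B (the rewrite author's own statement) =====
-- stated objective: simpler
-- what changed: Replaces the running per-domain counter dict over an enumerate loop with a direct index guard, a direct lookup of the domain at flat_index, and a single targeted prefix count of that one domain.
import Mathlib
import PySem

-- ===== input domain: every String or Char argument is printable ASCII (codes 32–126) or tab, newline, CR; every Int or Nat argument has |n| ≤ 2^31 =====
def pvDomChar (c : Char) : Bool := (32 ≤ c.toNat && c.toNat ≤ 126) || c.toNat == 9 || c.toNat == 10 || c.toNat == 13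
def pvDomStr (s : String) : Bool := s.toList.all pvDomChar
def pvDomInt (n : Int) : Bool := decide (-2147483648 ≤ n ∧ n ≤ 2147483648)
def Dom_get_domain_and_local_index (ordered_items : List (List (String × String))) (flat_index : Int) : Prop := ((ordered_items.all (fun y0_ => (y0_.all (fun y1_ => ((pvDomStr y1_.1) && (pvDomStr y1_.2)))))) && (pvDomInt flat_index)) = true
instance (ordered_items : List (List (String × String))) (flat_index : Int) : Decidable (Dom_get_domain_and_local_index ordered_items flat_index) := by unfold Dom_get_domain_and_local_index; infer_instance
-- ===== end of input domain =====

-- B replaces A's running per-domain counter dict with an index guard, a direct lookup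
-- of the domain at flat_index, and one targeted prefix count of that domain (objective: simpler).

-- item["domain"] : first-match lookup in the association list (shared dict-access helper)
def pvGetDomain (item : List (String × String)) : Option String :=
  (item.find? (fun p => p.1 == "domain")).map (·.2)

-- ===== PORT A =====
-- the enumerate loop with its counter dict; the `none` branch marks where Python raises KeyError (outside Pre_)
def pvGoA : List (List (String × String)) → Int → Int → PySem.Dict String Int → Option String × Option Int
  | [], _, _, _ => (none, none)
  | item :: rest, fi, i, counters =>
    match pvGetDomain item with
    | none => (none, none)  -- Python: KeyError, excluded by Pre_
    | some d =>
      let counters := if counters.contains d then counters else counters.insert d 0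
      if i == fi then (some d, some (counters.getD d 0))
      else pvGoA rest fi (i + 1) (counters.insert d (counters.getD d 0 + 1))

def get_domain_and_local_index (ordered_items : List (List (String × String))) (flat_index : Int) : Option String × Option Int :=
  pvGoA ordered_items flat_index 0 PySem.Dict.empty

-- ===== PORT B =====
def get_domain_and_local_index_alt (ordered_items : List (List (String × String))) (flat_index : Int) : Option String × Option Int :=
  if flat_index < 0 ∨ (ordered_items.length : Int) ≤ flat_index then (none, none)
  else
    match PySem.List.pyGet? ordered_items flat_index with
    | none => (none, none)  -- unreachable: the guard ensures the index is in range
    | some item =>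
      match pvGetDomain item with
      | none => (none, none)  -- Python: KeyError, excluded by Pre_
      | some d =>
        (some d,
         some ((((PySem.List.slice ordered_items none (some flat_index)).countP
                  (fun it => pvGetDomain it == some d)) : Nat) : Int))

-- ===== PRECONDITION & SPEC =====
-- Pre_ excludes exactly the inputs where A raises KeyError: an item missing the "domain" key
-- among those A visits (up to flat_index when it is in range, the whole list otherwise).
def Pre_get_domain_and_local_index (ordered_items : List (List (String × String))) (flat_index : Int) : Prop :=
  if 0 ≤ flat_index ∧ flat_index < (ordered_items.length : Int) then
    ∀ it ∈ ordered_items.take (flat_index.toNat + 1), (pvGetDomain it).isSome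
  else
    ∀ it ∈ ordered_items, (pvGetDomain it).isSome
instance (ordered_items : List (List (String × String))) (flat_index : Int) : Decidable (Pre_get_domain_and_local_index ordered_items flat_index) := by unfold Pre_get_domain_and_local_index; infer_instance

def pvWitness_get_domain_and_local_index : (List (List (String × String))) × Int :=
  ([[("domain", "a")], [("domain", "b")], [("domain", "a")]], 2)

def Spec_get_domain_and_local_index (ordered_items : List (List (String × String))) (flat_index : Int) (out : Option String × Option Int) : Prop := out = get_domain_and_local_index_alt ordered_items flat_index
instance (ordered_items : List (List (String × String))) (flat_index : Int) (out : Option String × Option Int) : Decidable (Spec_get_domain_and_local_index ordered_items flat_index out) := by unfold Spec_get_domain_and_local_index; infer_instance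

-- ===== CLAIM (what is proved, stated in full; the proofs are below) =====
def Claim_equal_get_domain_and_local_index : Prop := ∀ (ordered_items : List (List (String × String))) (flat_index : Int), Dom_get_domain_and_local_index ordered_items flat_index → Pre_get_domain_and_local_index ordered_items flat_index → Spec_get_domain_and_local_index ordered_items flat_index (get_domain_and_local_index ordered_items flat_index)

-- ===== LEMMAS AND PROOFS =====

-- characterisation of A's loop: from position i with counters recording, for every domain,
-- how many earlier items carried it, the loop returns the item at fi and its running count
theorem pvGoA_eq (l : List (List (String × String))) : ∀ (fi i : Int) (c : PySem.Dict String Int),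
    ((i ≤ fi ∧ fi < i + (l.length : Int)) →
      ∀ it ∈ l.take ((fi - i).toNat + 1), (pvGetDomain it).isSome) →
    (¬ (i ≤ fi ∧ fi < i + (l.length : Int)) → ∀ it ∈ l, (pvGetDomain it).isSome) →
    pvGoA l fi i c =
      if i ≤ fi ∧ fi < i + (l.length : Int) then
        match pvGetDomain (l.getD (fi - i).toNat []) with
        | none => (none, none)
        | some d => (some d, some (c.getD d 0 +
            ((l.take (fi - i).toNat).countP (fun it => pvGetDomain it == some d) : Int)))
      else (none, none) := by
  induction l with
  | nil =>
    intro fi i c _ _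
    simp [pvGoA]
  | cons item rest ih =>
    intro fi i c h1 h2
    have hkey : (pvGetDomain item).isSome := by
      by_cases hin : i ≤ fi ∧ fi < i + ((item :: rest).length : Int)
      · exact h1 hin item (by simp [List.take_succ_cons])
      · exact h2 hin item (by simp)
    obtain ⟨d, hd⟩ := Option.isSome_iff_exists.mp hkey
    -- the membership-initialising step leaves every getD _ 0 unchanged
    have hgetc1 : ∀ x, (if c.contains d then c else c.insert d 0).getD x 0 = c.getD x 0 := by
      intro x
      by_cases hc : c.contains d
      · rw [if_pos hc]
      · rw [if_neg hc, PySem.Dict.getD_insert]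
        by_cases hx : x = d
        · subst hx
          rw [if_pos rfl, PySem.Dict.getD_of_not_contains c 0 (by simpa using hc)]
        · rw [if_neg hx]
    by_cases hif : i = fi
    · -- return here
      subst hif
      have hin : i ≤ i ∧ i < i + ((item :: rest).length : Int) :=
        ⟨le_refl _, by push_cast [List.length_cons]; omega⟩
      have h0 : (i - i).toNat = 0 := by omega
      rw [if_pos hin]
      simp only [pvGoA, hd, beq_self_eq_true, if_true, h0, List.getD_cons_zero,
        List.take_zero, List.countP_nil]
      rw [hgetc1]
      norm_num
    · -- recurse: the incremented counters record the counts including item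
      have hgetc2 : ∀ x,
          ((if c.contains d then c else c.insert d 0).insert d
            ((if c.contains d then c else c.insert d 0).getD d 0 + 1)).getD x 0 =
          c.getD x 0 + (if pvGetDomain item == some x then (1 : Int) else 0) := by
        intro x
        rw [PySem.Dict.getD_insert]
        simp only [hgetc1]
        by_cases hx : x = d
        · subst hx; simp [hd]
        · have hdx : ¬ d = x := fun h => hx h.symm
          simp [hd, hx, hdx]
      have hne : (i == fi) = false := by simp [hif]
      simp only [pvGoA, hd, hne, Bool.false_eq_true, if_false]
      by_cases hin : i + 1 ≤ fi ∧ fi < i + 1 + (rest.length : Int)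
      · -- fi lies in rest
        have hin' : i ≤ fi ∧ fi < i + ((item :: rest).length : Int) := by
          simp only [List.length_cons]; push_cast; omega
        have hk : (fi - i).toNat = (fi - (i + 1)).toNat + 1 := by omega
        rw [ih fi (i + 1) _ ?hr1 ?hr2]
        case hr1 =>
          intro _ it hit
          apply h1 hin' it
          rw [hk]
          simpa [List.take_succ_cons] using List.mem_cons_of_mem item hit
        case hr2 => intro h; exact absurd hin h
        rw [if_pos hin, if_pos hin', hk]
        simp only [List.getD_cons_succ, List.take_succ_cons, List.countP_cons]
        cases hrest : pvGetDomain (rest.getD (fi - (i + 1)).toNat []) with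
        | none => rfl
        | some d' =>
          simp only [hgetc2, hd]
          push_cast
          split_ifs with hm <;> simp_all <;> ring
      · -- fi not reached in rest
        have hout : ¬ (i ≤ fi ∧ fi < i + ((item :: rest).length : Int)) := by
          simp only [List.length_cons]
          simp only [List.length_cons] at h1 h2
          push_cast at hin ⊢
          omega
        rw [ih fi (i + 1) _ ?hs1 ?hs2]
        case hs1 => intro h; exact absurd h hin
        case hs2 =>
          intro _ it hit
          exact h2 hout it (List.mem_cons_of_mem item hit)
        rw [if_neg hin, if_neg hout]

-- ===== VERDICT (by name: the statement is the Claim_ definition above) =====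
theorem get_domain_and_local_index_spec : Claim_equal_get_domain_and_local_index := by
  intro items fi _ hpre
  unfold Spec_get_domain_and_local_index get_domain_and_local_index get_domain_and_local_index_alt
  unfold Pre_get_domain_and_local_index at hpre
  by_cases hin : 0 ≤ fi ∧ fi < (items.length : Int)
  · rw [pvGoA_eq items fi 0 PySem.Dict.empty ?h1 ?h2]
    case h1 =>
      intro _ it hit
      rw [hin.1 |> fun _ => (if_pos hin)] at hpre
      exact hpre it (by simpa using hit)
    case h2 => intro h; exact absurd (by constructor <;> [exact hin.1; simpa using hin.2]) h
    have hguard : ¬ (fi < 0 ∨ (items.length : Int) ≤ fi) := by omega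
    have hin0 : 0 ≤ fi ∧ fi < 0 + (items.length : Int) := by omega
    rw [if_pos hin0, if_neg hguard]
    have hget : PySem.List.pyGet? items fi = some (items.getD (fi - 0).toNat []) := by
      rw [PySem.List.pyGet?_of_nonneg items hin.1]
      have : fi.toNat < items.length := by omega
      simp [List.getD, List.getElem?_eq_getElem this, fi.sub_zero]
    rw [hget]
    cases hdom : pvGetDomain (items.getD (fi - 0).toNat []) with
    | none =>
      rw [show ((fi : Int) - 0) = fi from by ring] at hdom
      simp only [List.getD] at hdom
      simp [hdom]
    | some d =>
      rw [show ((fi : Int) - 0) = fi from by ring] at hdom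
      simp only [List.getD] at hdom
      rw [PySem.List.slice_to items hin.1]
      simp [hdom, PySem.Dict.getD_empty]
  · rw [pvGoA_eq items fi 0 PySem.Dict.empty ?h3 ?h4]
    case h3 => intro h; exact absurd ⟨h.1, by simpa using h.2⟩ hin
    case h4 =>
      intro _ it hit
      rw [if_neg hin] at hpre
      exact hpre it hit
    have hguard : fi < 0 ∨ (items.length : Int) ≤ fi := by omega
    rw [if_pos hguard, if_neg (by omega : ¬ (0 ≤ fi ∧ fi < 0 + (items.length : Int)))]
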